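-- pv_equiv track=rewrite | github.com/gabriellecdjscott/AIfuelemissionrecommendation | app.py | check_weather_conditions
-- ===== SOURCE A (Python) =====
-- def check_weather_conditions(weather_data):
--     try:
--         weather_conditions = weather_data['data'][0]['weather']
--         is_rainfall = any(condition['value'] in ['RA', 'TSRA'] for condition in weather_conditions)
--         is_thunderstorms = any(condition['value'] == 'TS' for condition in weather_conditions)
--         return is_rainfall, is_thunderstorms
--     except (IndexError, KeyError):
--         return False, False
-- ===== SOURCE B (Python) =====
-- def check_weather_conditions(weather_data):
--     try:
--         conditions = weather_data['data'][0]['weather']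
--     except (IndexError, KeyError):
--         return False, False
--     is_rainfall = False
--     is_thunderstorms = False
--     try:
--         for condition in conditions:
--             value = condition['value']
--             is_rainfall = is_rainfall or value == 'RA' or value == 'TSRA'
--             is_thunderstorms = is_thunderstorms or value == 'TS'
--             if is_rainfall and is_thunderstorms:
--                 break
--     except KeyError:
--         return False, False
--     return is_rainfall, is_thunderstorms
-- ===== Notes on version B (the rewrite author's own statement) =====
-- stated objective: alternative
-- what changed: Replaces A's two separate any-scans over the condition list with a single fused pass maintaining both flags and breaking early once both are set; the extraction of the condition list is isolated in its own try block.
import Mathlib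
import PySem

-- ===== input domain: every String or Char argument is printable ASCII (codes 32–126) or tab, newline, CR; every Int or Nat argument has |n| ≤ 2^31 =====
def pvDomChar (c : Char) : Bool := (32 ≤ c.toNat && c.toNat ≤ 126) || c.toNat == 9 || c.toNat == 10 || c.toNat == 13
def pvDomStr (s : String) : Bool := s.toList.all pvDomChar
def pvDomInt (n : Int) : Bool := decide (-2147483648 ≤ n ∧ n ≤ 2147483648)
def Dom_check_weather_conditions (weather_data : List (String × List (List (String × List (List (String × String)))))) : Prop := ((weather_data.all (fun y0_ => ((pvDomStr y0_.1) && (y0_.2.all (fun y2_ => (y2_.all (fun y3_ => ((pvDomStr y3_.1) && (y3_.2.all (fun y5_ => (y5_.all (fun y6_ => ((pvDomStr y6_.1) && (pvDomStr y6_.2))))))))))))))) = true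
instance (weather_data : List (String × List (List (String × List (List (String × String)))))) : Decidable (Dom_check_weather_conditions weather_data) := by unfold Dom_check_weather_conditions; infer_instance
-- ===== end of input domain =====

-- B fuses A's two any-scans over the condition list into one early-exiting pass (objective: alternative).

-- ===== PORT A =====
-- any(condition['value'] in ['RA', 'TSRA'] for condition in weather_conditions): none = a KeyError raised during the scan
def pvAnyIn_check_weather_conditions : List (List (String × String)) → Option Bool
  | [] => some false
  | c :: rest =>
    match List.lookup "value" c with
    | none => none
    | some v => if ["RA", "TSRA"].contains v then some true else pvAnyIn_check_weather_conditions rest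

-- any(condition['value'] == 'TS' for condition in weather_conditions): none = a KeyError raised during the scan
def pvAnyTS_check_weather_conditions : List (List (String × String)) → Option Bool
  | [] => some false
  | c :: rest =>
    match List.lookup "value" c with
    | none => none
    | some v => if v == "TS" then some true else pvAnyTS_check_weather_conditions rest

def check_weather_conditions (weather_data : List (String × List (List (String × List (List (String × String)))))) : Bool × Bool :=
  match List.lookup "data" weather_data with
  | none => (false, false)                  -- KeyError 'data' caught
  | some lst =>
    match PySem.List.pyGet? lst 0 with
    | none => (false, false)                -- IndexError caught
    | some d =>
      match List.lookup "weather" d with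
      | none => (false, false)              -- KeyError 'weather' caught
      | some wc =>
        match pvAnyIn_check_weather_conditions wc with
        | none => (false, false)            -- KeyError 'value' during the first scan, caught
        | some is_rainfall =>
          match pvAnyTS_check_weather_conditions wc with
          | none => (false, false)          -- KeyError 'value' during the second scan, caught
          | some is_thunderstorms => (is_rainfall, is_thunderstorms)

-- ===== PORT B =====
-- weather_data['data'][0]['weather'] with IndexError/KeyError propagating as none
def pvResolve_check_weather_conditions (weather_data : List (String × List (List (String × List (List (String × String)))))) : Option (List (List (String × String))) :=
  (List.lookup "data" weather_data).bind fun lst =>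
    (PySem.List.pyGet? lst 0).bind fun d => List.lookup "weather" d

-- the single fused loop with early break; (false, false) = the caught KeyError on a missing 'value' key
def pvScan_check_weather_conditions : List (List (String × String)) → Bool → Bool → Bool × Bool
  | [], is_rainfall, is_thunderstorms => (is_rainfall, is_thunderstorms)
  | c :: rest, is_rainfall, is_thunderstorms =>
    match List.lookup "value" c with
    | none => (false, false)
    | some v =>
      let r := is_rainfall || v == "RA" || v == "TSRA"
      let t := is_thunderstorms || v == "TS"
      if r && t then (r, t) else pvScan_check_weather_conditions rest r t

def check_weather_conditions_alt (weather_data : List (String × List (List (String × List (List (String × String)))))) : Bool × Bool :=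
  match pvResolve_check_weather_conditions weather_data with
  | none => (false, false)
  | some conditions => pvScan_check_weather_conditions conditions false false

-- ===== PRECONDITION & SPEC =====
def Spec_check_weather_conditions (weather_data : List (String × List (List (String × List (List (String × String)))))) (out : Bool × Bool) : Prop := out = check_weather_conditions_alt weather_data
instance (weather_data : List (String × List (List (String × List (List (String × String)))))) (out : Bool × Bool) : Decidable (Spec_check_weather_conditions weather_data out) := by unfold Spec_check_weather_conditions; infer_instance

-- ===== CLAIM (what is proved, stated in full; the proofs are below) =====
def Claim_equal_check_weather_conditions : Prop := ∀ (weather_data : List (String × List (List (String × List (List (String × String)))))), Dom_check_weather_conditions weather_data → Spec_check_weather_conditions weather_data (check_weather_conditions weather_data)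

-- ===== LEMMAS AND PROOFS =====

-- invariant: if the rainfall scan hits a missing 'value' key, the TS scan cannot return false
-- (a TS match would have to occur strictly before the first missing key, making the result true)
theorem pvAux1_check_weather_conditions (xs : List (List (String × String))) :
    pvAnyIn_check_weather_conditions xs = none →
      ∀ b, pvAnyTS_check_weather_conditions xs = some b → b = true := by
  induction xs with
  | nil => simp [pvAnyIn_check_weather_conditions]
  | cons c rest ih =>
    intro hI b hT
    cases h : List.lookup "value" c with
    | none => simp [pvAnyTS_check_weather_conditions, h] at hT
    | some v =>
      simp only [pvAnyIn_check_weather_conditions, h] at hI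
      simp only [pvAnyTS_check_weather_conditions, h] at hT
      by_cases hts : (v == "TS") = true
      · rw [if_pos hts] at hT; exact (Option.some.inj hT).symm
      · rw [if_neg hts] at hT
        by_cases hin : (["RA", "TSRA"].contains v) = true
        · rw [if_pos hin] at hI; exact absurd hI (by simp)
        · rw [if_neg hin] at hI; exact ih hI b hT

-- symmetric invariant for the other scan
theorem pvAux2_check_weather_conditions (xs : List (List (String × String))) :
    pvAnyTS_check_weather_conditions xs = none →
      ∀ b, pvAnyIn_check_weather_conditions xs = some b → b = true := by
  induction xs with
  | nil => simp [pvAnyTS_check_weather_conditions]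
  | cons c rest ih =>
    intro hT b hI
    cases h : List.lookup "value" c with
    | none => simp [pvAnyIn_check_weather_conditions, h] at hI
    | some v =>
      simp only [pvAnyIn_check_weather_conditions, h] at hI
      simp only [pvAnyTS_check_weather_conditions, h] at hT
      by_cases hin : (["RA", "TSRA"].contains v) = true
      · rw [if_pos hin] at hI; exact (Option.some.inj hI).symm
      · rw [if_neg hin] at hI
        by_cases hts : (v == "TS") = true
        · rw [if_pos hts] at hT; exact absurd hT (by simp)
        · rw [if_neg hts] at hT; exact ih hT b hI

-- characterisation of B's fused scan in terms of A's two scans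
theorem pvScan_eq_check_weather_conditions (wc : List (List (String × String))) :
    ∀ (r t : Bool), (r && t) = false →
      pvScan_check_weather_conditions wc r t =
        match pvAnyIn_check_weather_conditions wc, pvAnyTS_check_weather_conditions wc with
        | some a, some b => (r || a, t || b)
        | some _, none => if t then (true, true) else (false, false)
        | none, some _ => if r then (true, true) else (false, false)
        | none, none => (false, false) := by
  induction wc with
  | nil => intro r t _; simp [pvScan_check_weather_conditions, pvAnyIn_check_weather_conditions,
      pvAnyTS_check_weather_conditions]
  | cons c rest ih =>
    intro r t hrt
    simp only [pvScan_check_weather_conditions, pvAnyIn_check_weather_conditions,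
      pvAnyTS_check_weather_conditions]
    cases h : List.lookup "value" c with
    | none => rfl
    | some v =>
      simp only [List.contains_cons, List.contains_nil, Bool.or_false]
      by_cases hra : v = "RA"
      · have e1 : (v == "RA") = true := by simp [hra]
        have e2 : (v == "TSRA") = false := by simp [hra]
        have e3 : (v == "TS") = false := by simp [hra]
        cases r <;> cases t <;> simp [e1, e2, e3, ih] <;>
          cases hI : pvAnyIn_check_weather_conditions rest <;>
          cases hT : pvAnyTS_check_weather_conditions rest <;> (try simp) <;>
          first
          | exact pvAux1_check_weather_conditions rest hI _ hT
          | exact pvAux2_check_weather_conditions rest hT _ hI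
          | simp at hrt
      · by_cases htsra : v = "TSRA"
        · have e1 : (v == "RA") = false := by simp [htsra]
          have e2 : (v == "TSRA") = true := by simp [htsra]
          have e3 : (v == "TS") = false := by simp [htsra]
          cases r <;> cases t <;> simp [e1, e2, e3, ih] <;>
            cases hI : pvAnyIn_check_weather_conditions rest <;>
            cases hT : pvAnyTS_check_weather_conditions rest <;> (try simp) <;>
            first
            | exact pvAux1_check_weather_conditions rest hI _ hT
            | exact pvAux2_check_weather_conditions rest hT _ hI
            | simp at hrt
        · by_cases hts : v = "TS"
          · have e1 : (v == "RA") = false := by simp [hts]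
            have e2 : (v == "TSRA") = false := by simp [hts]
            have e3 : (v == "TS") = true := by simp [hts]
            cases r <;> cases t <;> simp [e1, e2, e3, ih] <;>
              cases hI : pvAnyIn_check_weather_conditions rest <;>
              cases hT : pvAnyTS_check_weather_conditions rest <;> (try simp) <;>
              first
              | exact pvAux1_check_weather_conditions rest hI _ hT
              | exact pvAux2_check_weather_conditions rest hT _ hI
              | simp at hrt
          · have e1 : (v == "RA") = false := by simp [hra]
            have e2 : (v == "TSRA") = false := by simp [htsra]
            have e3 : (v == "TS") = false := by simp [hts]
            cases r <;> cases t <;> simp [e1, e2, e3, ih] <;>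
              cases hI : pvAnyIn_check_weather_conditions rest <;>
              cases hT : pvAnyTS_check_weather_conditions rest <;> (try simp) <;>
              first
              | exact pvAux1_check_weather_conditions rest hI _ hT
              | exact pvAux2_check_weather_conditions rest hT _ hI
              | simp at hrt

-- ===== VERDICT (by name: the statement is the Claim_ definition above) =====
theorem check_weather_conditions_spec : Claim_equal_check_weather_conditions := by
  intro weather_data _
  unfold Spec_check_weather_conditions check_weather_conditions check_weather_conditions_alt
    pvResolve_check_weather_conditions
  cases h1 : List.lookup "data" weather_data with
  | none => rfl
  | some lst =>
    cases h2 : PySem.List.pyGet? lst 0 with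
    | none => simp [h2]
    | some d =>
      cases h3 : List.lookup "weather" d with
      | none => simp [h2, h3]
      | some wc =>
        simp only [h2, h3, Option.bind_some]
        rw [pvScan_eq_check_weather_conditions wc false false rfl]
        cases hA : pvAnyIn_check_weather_conditions wc <;>
          cases hB : pvAnyTS_check_weather_conditions wc <;> simp
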